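-- pv_equiv track=rewrite | github.com/ArchipelagoMW/Archipelago | worlds/shapez/data/generate_shapesanity.py | color_to_needed_building
-- ===== SOURCE A (Python) =====
-- from typing import Dict, List
--
-- def color_to_needed_building(color_list: List[str]) -> str:
--     for next_color in color_list:
--         if next_color in ["Yellow", "Purple", "Cyan", "White", "y", "p", "c", "w"]:
--             return "Mixed"
--     for next_color in color_list:
--         if next_color not in ["Uncolored", "u"]:
--             return "Painted"
--     return "Uncolored"
-- ===== SOURCE B (Python) =====
-- def color_to_needed_building(color_list):
--     has_painted = False
--     for c in color_list:
--         if c in {"Yellow", "Purple", "Cyan", "White", "y", "p", "c", "w"}: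
--             return "Mixed"
--         if c not in {"Uncolored", "u"}:
--             has_painted = True
--     return "Painted" if has_painted else "Uncolored"
-- ===== Notes on version B (the rewrite author's own statement) =====
-- stated objective: simpler
-- what changed: Two sequential scans (one for mixed colors, one for painted) merged into a single pass that keeps a has_painted flag; Mixed still returns immediately so its whole-list priority is preserved.
import Mathlib
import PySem

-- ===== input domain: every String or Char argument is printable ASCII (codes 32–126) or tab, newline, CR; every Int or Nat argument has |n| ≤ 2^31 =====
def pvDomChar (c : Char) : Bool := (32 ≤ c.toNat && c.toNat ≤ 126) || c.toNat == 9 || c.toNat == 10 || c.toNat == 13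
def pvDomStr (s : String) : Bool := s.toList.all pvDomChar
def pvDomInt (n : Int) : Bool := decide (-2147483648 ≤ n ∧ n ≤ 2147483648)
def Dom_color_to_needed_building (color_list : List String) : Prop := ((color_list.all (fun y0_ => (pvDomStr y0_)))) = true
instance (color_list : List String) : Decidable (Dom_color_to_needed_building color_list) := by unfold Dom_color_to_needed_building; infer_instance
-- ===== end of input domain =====

-- B merges A's two sequential scans into a single pass with a has_painted flag; objective: simpler.


-- ===== PORT A =====
-- membership tests of A's literal lists
def pvIsMixed (c : String) : Bool := (["Yellow", "Purple", "Cyan", "White", "y", "p", "c", "w"] : List String).contains c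
def pvIsUncol (c : String) : Bool := (["Uncolored", "u"] : List String).contains c

-- second for-loop of A
def pvALoop2 : List String → String
  | [] => "Uncolored"
  | c :: rest => if ¬ pvIsUncol c then "Painted" else pvALoop2 rest

-- first for-loop of A; falls through to the second loop over the original list
def pvALoop1 (orig : List String) : List String → String
  | [] => pvALoop2 orig
  | c :: rest => if pvIsMixed c then "Mixed" else pvALoop1 orig rest

def color_to_needed_building (color_list : List String) : String :=
  pvALoop1 color_list color_list

-- ===== PORT B =====
-- single pass carrying the has_painted flag
def pvBLoop : List String → Bool → String
  | [], has_painted => if has_painted then "Painted" else "Uncolored"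
  | c :: rest, has_painted =>
    if pvIsMixed c then "Mixed"
    else if ¬ pvIsUncol c then pvBLoop rest true
    else pvBLoop rest has_painted

def color_to_needed_building_alt (color_list : List String) : String :=
  pvBLoop color_list false

-- ===== PRECONDITION & SPEC =====
def Spec_color_to_needed_building (color_list : List String) (out : String) : Prop := out = color_to_needed_building_alt color_list
instance (color_list : List String) (out : String) : Decidable (Spec_color_to_needed_building color_list out) := by unfold Spec_color_to_needed_building; infer_instance

-- ===== CLAIM (what is proved, stated in full; the proofs are below) =====
def Claim_equal_color_to_needed_building : Prop := ∀ (color_list : List String), Dom_color_to_needed_building color_list → Spec_color_to_needed_building color_list (color_to_needed_building color_list)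

-- ===== LEMMAS AND PROOFS =====

-- A's second loop returns "Painted" iff some element is not uncolored
theorem pvALoop2_eq (l : List String) :
    pvALoop2 l = if l.any (fun c => ¬ pvIsUncol c) then "Painted" else "Uncolored" := by
  induction l with
  | nil => simp [pvALoop2]
  | cons c rest ih => by_cases h : pvIsUncol c <;> simp [pvALoop2, h, ih]

-- A's first loop returns "Mixed" iff some element is mixed, else falls to loop 2
theorem pvALoop1_eq (orig l : List String) :
    pvALoop1 orig l = if l.any pvIsMixed then "Mixed" else pvALoop2 orig := by
  induction l with
  | nil => simp [pvALoop1]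
  | cons c rest ih => by_cases h : pvIsMixed c <;> simp [pvALoop1, h, ih]

-- B's loop, characterised with the flag generalized
theorem pvBLoop_eq (l : List String) (hp : Bool) :
    pvBLoop l hp =
      if l.any pvIsMixed then "Mixed"
      else if hp || l.any (fun c => ¬ pvIsUncol c) then "Painted" else "Uncolored" := by
  induction l generalizing hp with
  | nil => simp [pvBLoop]
  | cons c rest ih =>
    by_cases hm : pvIsMixed c
    · simp [pvBLoop, hm]
    · by_cases hu : pvIsUncol c <;>
        simp [pvBLoop, hm, hu, ih]

-- ===== VERDICT (by name: the statement is the Claim_ definition above) =====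
theorem color_to_needed_building_spec : Claim_equal_color_to_needed_building := by
  intro l _
  unfold Spec_color_to_needed_building color_to_needed_building color_to_needed_building_alt
  rw [pvALoop1_eq, pvBLoop_eq, pvALoop2_eq]
  simp
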